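-- pv_equiv track=rewrite | github.com/tomba/pyv4l2 | utils/cam-configs/xilinx-gmsl.py | expand_link_path
-- ===== SOURCE A (Python) =====
-- def expand_link_path(arr):
--     links = []
--
--     current_source = None
--
--     for ent, sink_pad, source_pad in arr:
--         if current_source:
--             links.append({ 'src': current_source,
--                            'dst': (ent, sink_pad) })
--
--         current_source = (ent, source_pad)
--
--     return links
-- ===== SOURCE B (Python) =====
-- def expand_link_path(arr):
--     entries = list(arr)
--     # staged passes: project the source endpoints and sink endpoints separately,
--     # then pair each source with the next entry's sink.
--     sources = [(ent, source_pad) for ent, _sink_pad, source_pad in entries]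
--     sinks = [(ent, sink_pad) for ent, sink_pad, _source_pad in entries]
--     return [{'src': s, 'dst': d} for s, d in zip(sources, sinks[1:])]
-- ===== Notes on version B (the rewrite author's own statement) =====
-- stated objective: idiomatic
-- what changed: Replaces A's single stateful loop carrying a running current_source with staged passes: two projection passes building the source-endpoint and sink-endpoint lists, then a zip of one against the shifted other.
import Mathlib
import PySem

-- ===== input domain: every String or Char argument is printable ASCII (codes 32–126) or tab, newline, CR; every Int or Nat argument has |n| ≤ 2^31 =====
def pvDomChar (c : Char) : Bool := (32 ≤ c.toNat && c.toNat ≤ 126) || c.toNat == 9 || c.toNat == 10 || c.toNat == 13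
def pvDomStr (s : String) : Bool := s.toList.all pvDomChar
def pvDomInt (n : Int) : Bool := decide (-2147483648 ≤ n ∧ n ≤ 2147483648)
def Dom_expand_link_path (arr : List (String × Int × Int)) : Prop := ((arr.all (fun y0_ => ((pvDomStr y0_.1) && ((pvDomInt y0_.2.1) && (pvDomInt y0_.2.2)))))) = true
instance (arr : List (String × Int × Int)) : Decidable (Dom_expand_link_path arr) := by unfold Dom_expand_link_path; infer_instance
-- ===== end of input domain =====

-- B replaces A's stateful loop (running current_source accumulator) with staged passes:
-- two projection lists (sources, sinks) zipped with a shift; objective: idiomatic.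

-- ===== PORT A =====
-- loop body of A: carries (links, current_source); 'if current_source:' is true iff it is not None
def expand_link_path_step (st : List (List (String × String × Int)) × Option (String × Int))
    (x : String × Int × Int) : List (List (String × String × Int)) × Option (String × Int) :=
  let links := match st.2 with
    | some s => st.1 ++ [[("src", s), ("dst", (x.1, x.2.1))]]
    | none => st.1
  (links, some (x.1, x.2.2))

def expand_link_path (arr : List (String × Int × Int)) : List (List (String × String × Int)) :=
  (arr.foldl expand_link_path_step ([], none)).1

-- ===== PORT B =====
-- staged passes: project sources and sinks, then zip sources with sinks[1:]
def expand_link_path_alt (arr : List (String × Int × Int)) : List (List (String × String × Int)) :=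
  let sources := arr.map (fun x => (x.1, x.2.2))
  let sinks := arr.map (fun x => (x.1, x.2.1))
  (sources.zip sinks.tail).map (fun p => [("src", p.1), ("dst", p.2)])

-- ===== PRECONDITION & SPEC =====
def Spec_expand_link_path (arr : List (String × Int × Int)) (out : List (List (String × String × Int))) : Prop := out = expand_link_path_alt arr
instance (arr : List (String × Int × Int)) (out : List (List (String × String × Int))) : Decidable (Spec_expand_link_path arr out) := by unfold Spec_expand_link_path; infer_instance

-- ===== CLAIM (what is proved, stated in full; the proofs are below) =====
def Claim_equal_expand_link_path : Prop := ∀ (arr : List (String × Int × Int)), Dom_expand_link_path arr → Spec_expand_link_path arr (expand_link_path arr)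

-- ===== LEMMAS AND PROOFS =====

-- links produced by A's loop once current_source is set, expressed recursively
def linksFrom (s : String × Int) (arr : List (String × Int × Int)) : List (List (String × String × Int)) :=
  match arr with
  | [] => []
  | x :: rest => [("src", s), ("dst", (x.1, x.2.1))] :: linksFrom (x.1, x.2.2) rest

theorem foldl_step_some (arr : List (String × Int × Int)) :
    ∀ (links : List (List (String × String × Int))) (s : String × Int),
      (arr.foldl expand_link_path_step (links, some s)).1 = links ++ linksFrom s arr := by
  induction arr with
  | nil => intro links s; simp [linksFrom]
  | cons x rest ih =>
      intro links s
      simp [expand_link_path_step, linksFrom, ih]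

theorem alt_cons (rest : List (String × Int × Int)) :
    ∀ (x : String × Int × Int),
      expand_link_path_alt (x :: rest) = linksFrom (x.1, x.2.2) rest := by
  induction rest with
  | nil => intro x; simp [expand_link_path_alt, linksFrom]
  | cons y rest ih =>
      intro x
      have h := ih y
      simp [expand_link_path_alt, linksFrom] at h ⊢
      exact h

-- ===== VERDICT (by name: the statement is the Claim_ definition above) =====
theorem expand_link_path_spec : Claim_equal_expand_link_path := by
  intro arr _
  unfold Spec_expand_link_path
  cases arr with
  | nil => rfl
  | cons x rest =>
      show (List.foldl expand_link_path_step (expand_link_path_step ([], none) x) rest).1 = _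
      simp [expand_link_path_step, foldl_step_some, alt_cons]
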